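-- pv_equiv track=rewrite | github.com/rikuson41/lesson_algorithm | go_party/go_party.py | chooseTime
-- ===== SOURCE A (Python) =====
-- def chooseTime(times):
--     rcount = 0
--     maxcount = time = 0
--     for t in times:
--         if t[1] == 'start':
--             rcount += 1
--         elif t[1] == 'end':
--             rcount -= 1
--         if rcount > maxcount:
--             maxcount = rcount
--             time = t[0]
--     return maxcount, time
-- ===== SOURCE B (Python) =====
-- def chooseTime(times):
--     # Pass 1: build the running-count table paired with each event time.
--     table = []
--     c = 0
--     for t in times:
--         if t[1] == 'start':
--             c += 1
--         elif t[1] == 'end':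
--             c -= 1
--         table.append((c, t[0]))
--     # Pass 2: global maximum running count.
--     m = 0
--     for cnt, _ in table:
--         if cnt > m:
--             m = cnt
--     if m == 0:
--         return 0, 0
--     # Pass 3: first time the running count attains the maximum.
--     for cnt, tt in table:
--         if cnt == m:
--             return m, tt
--     return 0, 0  # unreachable: m > 0 occurs in the table
-- ===== Notes on version B (the rewrite author's own statement) =====
-- stated objective: alternative
-- what changed: Replaces the single fused sweep (running count, max and time updated together) with a build-table-then-argmax decomposition: first materialize the running-count table, then a pass for the global maximum, then a pass finding the first time that count is attained.
import Mathlib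
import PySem

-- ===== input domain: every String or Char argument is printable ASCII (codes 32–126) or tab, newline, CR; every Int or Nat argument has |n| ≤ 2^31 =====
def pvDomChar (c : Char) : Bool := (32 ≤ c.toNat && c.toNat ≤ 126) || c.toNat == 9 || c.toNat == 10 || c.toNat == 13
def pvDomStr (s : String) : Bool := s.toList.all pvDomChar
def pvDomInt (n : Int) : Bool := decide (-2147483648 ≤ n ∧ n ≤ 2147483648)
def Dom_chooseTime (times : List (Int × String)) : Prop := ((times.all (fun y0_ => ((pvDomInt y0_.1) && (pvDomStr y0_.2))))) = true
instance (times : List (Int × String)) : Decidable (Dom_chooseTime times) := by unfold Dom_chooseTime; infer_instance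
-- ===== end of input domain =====

-- B replaces A's single fused sweep by a build-running-count-table, then max, then
-- first-attainment decomposition (same O(n) cost; objective: alternative structure).


-- ===== PORT A =====
-- the fused sweep: state = (rcount, maxcount, time)
def pvStep (st : Int × Int × Int) (t : Int × String) : Int × Int × Int :=
  let rcount := if t.2 == "start" then st.1 + 1 else if t.2 == "end" then st.1 - 1 else st.1
  if rcount > st.2.1 then (rcount, rcount, t.1) else (rcount, st.2.1, st.2.2)

def chooseTime (times : List (Int × String)) : Int × Int :=
  let s := times.foldl pvStep (0, 0, 0)
  (s.2.1, s.2.2)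

-- ===== PORT B =====
-- pass 1: running-count table (count so far, time) for each event
def pvDelta (lab : String) : Int :=
  if lab == "start" then 1 else if lab == "end" then -1 else 0

def pvTable (c : Int) : List (Int × String) → List (Int × Int)
  | [] => []
  | t :: ts => (c + pvDelta t.2, t.1) :: pvTable (c + pvDelta t.2) ts

-- pass 2: maximum of the counts (loop `if cnt > m then m := cnt`)
def pvMax (m : Int) (tbl : List (Int × Int)) : Int :=
  tbl.foldl (fun acc p => if p.1 > acc then p.1 else acc) m

def chooseTime_alt (times : List (Int × String)) : Int × Int :=
  let tbl := pvTable 0 times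
  let m := pvMax 0 tbl
  if m == 0 then (0, 0)
  else
    -- pass 3: first entry whose count equals the maximum
    match tbl.find? (fun p => p.1 == m) with
    | some p => (m, p.2)
    | none => (0, 0)

-- ===== PRECONDITION & SPEC =====
def Spec_chooseTime (times : List (Int × String)) (out : Int × Int) : Prop := out = chooseTime_alt times
instance (times : List (Int × String)) (out : Int × Int) : Decidable (Spec_chooseTime times out) := by unfold Spec_chooseTime; infer_instance

-- ===== CLAIM (what is proved, stated in full; the proofs are below) =====
def Claim_equal_chooseTime : Prop := ∀ (times : List (Int × String)), Dom_chooseTime times → Spec_chooseTime times (chooseTime times)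

-- ===== LEMMAS AND PROOFS =====

lemma pvMax_ge (tbl : List (Int × Int)) : ∀ m : Int, m ≤ pvMax m tbl := by
  induction tbl with
  | nil => intro m; simp [pvMax]
  | cons a tl ih =>
    intro m
    show m ≤ pvMax (if a.1 > m then a.1 else m) tl
    have h := ih (if a.1 > m then a.1 else m)
    split_ifs at h ⊢ <;> omega

lemma pvMax_find_some (tbl : List (Int × Int)) :
    ∀ m : Int, m < pvMax m tbl →
      ∃ p, tbl.find? (fun q => q.1 == pvMax m tbl) = some p := by
  induction tbl with
  | nil => intro m h; simp [pvMax] at h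
  | cons a tl ih =>
    intro m h
    have hstep : pvMax m (a :: tl) = pvMax (if a.1 > m then a.1 else m) tl := rfl
    by_cases hh : a.1 = pvMax m (a :: tl)
    · exact ⟨a, by simp [List.find?, hh]⟩
    · rw [hstep] at hh h ⊢
      have h1 : (if a.1 > m then a.1 else m) < pvMax (if a.1 > m then a.1 else m) tl := by
        have hge := pvMax_ge tl (if a.1 > m then a.1 else m)
        split_ifs at h hh hge ⊢ <;> omega
      obtain ⟨p, hp⟩ := ih _ h1
      refine ⟨p, ?_⟩
      simp [List.find?, show (a.1 == pvMax (if a.1 > m then a.1 else m) tl) = false by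
        simpa using hh]
      exact hp

-- what A's fold computes from an arbitrary state, in terms of B's table
lemma sweep_eq (ts : List (Int × String)) :
    ∀ (c m tm : Int),
      (ts.foldl pvStep (c, m, tm)).2 =
        (pvMax m (pvTable c ts),
         if pvMax m (pvTable c ts) = m then tm
         else ((((pvTable c ts).find? (fun p => p.1 == pvMax m (pvTable c ts))).map Prod.snd).getD tm)) := by
  induction ts with
  | nil => intro c m tm; simp [pvTable, pvMax]
  | cons t tl ih =>
    intro c m tm
    have hc : (if t.2 == "start" then c + 1 else if t.2 == "end" then c - 1 else c)
        = c + pvDelta t.2 := by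
      unfold pvDelta; split_ifs <;> ring
    set c' := c + pvDelta t.2 with hc'
    have htbl : pvTable c (t :: tl) = (c', t.1) :: pvTable c' tl := rfl
    have hM : pvMax m (pvTable c (t :: tl)) = pvMax (if c' > m then c' else m) (pvTable c' tl) := rfl
    have hfold : (t :: tl).foldl pvStep (c, m, tm)
        = tl.foldl pvStep (if c' > m then (c', c', t.1) else (c', m, tm)) := by
      show tl.foldl pvStep (pvStep (c, m, tm) t) = _
      simp only [pvStep, hc]
    rw [hfold, hM, htbl]
    by_cases hcm : c' > m
    · simp only [if_pos hcm]
      rw [ih c' c' t.1]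
      have hge := pvMax_ge (pvTable c' tl) c'
      set M := pvMax c' (pvTable c' tl) with hMdef
      have hMm : M ≠ m := by omega
      by_cases hhead : c' = M
      · -- the max is attained at the head
        simp [List.find?, hhead, hMm]
      · have hlt : c' < M := lt_of_le_of_ne hge hhead
        obtain ⟨p, hp⟩ := pvMax_find_some (pvTable c' tl) c' hlt
        rw [← hMdef] at hp
        simp [List.find?, show (c' == M) = false by simpa using hhead, hp, hMm,
          show M ≠ c' from fun h => hhead h.symm]
    · simp only [if_neg hcm]
      rw [ih c' m tm]
      set M := pvMax m (pvTable c' tl) with hMdef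
      by_cases hMm : M = m
      · simp [hMm]
      · have hge := pvMax_ge (pvTable c' tl) m
        have hhead : c' ≠ M := by omega
        simp [List.find?, hMm, show (c' == M) = false by simpa using hhead]

-- ===== VERDICT (by name: the statement is the Claim_ definition above) =====
theorem chooseTime_spec : Claim_equal_chooseTime := by
  intro times _
  show chooseTime times = chooseTime_alt times
  unfold chooseTime chooseTime_alt
  simp only [sweep_eq times 0 0 0]
  set tbl := pvTable 0 times with htbl
  set M := pvMax 0 tbl with hM
  have hge := pvMax_ge tbl 0
  by_cases h0 : M = 0
  · simp [h0]
  · obtain ⟨p, hp⟩ := pvMax_find_some tbl 0 (lt_of_le_of_ne hge (fun h => h0 h.symm))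
    rw [← hM] at hp
    simp [h0, hp]
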